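-- pv_equiv track=rewrite | github.com/karthikshivaram24/Information-Retrieval---Assigments | a0/boolean_search.py | sort_by_num_postings
-- ===== SOURCE A (Python) =====
-- def sort_by_num_postings(words, index):
--     """
--     Sort the words in increasing order of the length of their postings list in
--     index. You may use Python's builtin sorted method.
--     Params:
--       words....a list of strings.
--       index....An inverted index; a dict mapping words to lists of document
--       ids, sorted in ascending order.
--     Returns:
--       A list of words, sorted in ascending order by the number of document ids
--       in the index.
--
--     >>> sort_by_num_postings(['a', 'b', 'c'], {'a': [0, 1], 'b': [1, 2, 3], 'c': [4]})
--     ['c', 'a', 'b']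
--     """
--     ###TODO
--     pass
--     sorted_list = []
--     sorted_index_words = sorted(index, key=lambda k: len(index[k]), reverse=False)
--     for sorted_index_word in sorted_index_words:
--         if sorted_index_word in words:
--             sorted_list.append(sorted_index_word)
--     return sorted_list
-- ===== SOURCE B (Python) =====
-- def sort_by_num_postings(words, index):
--     buckets = {}
--     for w, postings in index.items():
--         if w in words:
--             buckets.setdefault(len(postings), []).append(w)
--     out = []
--     for n in sorted(buckets):
--         out.extend(buckets[n])
--     return out
-- ===== Notes on version B (the rewrite author's own statement) =====
-- stated objective: alternative
-- what changed: Replaces A's comparison sort of all index keys followed by a membership filter with a single grouping pass that buckets the kept words by postings-list length and then emits the buckets in ascending length order.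
import Mathlib
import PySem

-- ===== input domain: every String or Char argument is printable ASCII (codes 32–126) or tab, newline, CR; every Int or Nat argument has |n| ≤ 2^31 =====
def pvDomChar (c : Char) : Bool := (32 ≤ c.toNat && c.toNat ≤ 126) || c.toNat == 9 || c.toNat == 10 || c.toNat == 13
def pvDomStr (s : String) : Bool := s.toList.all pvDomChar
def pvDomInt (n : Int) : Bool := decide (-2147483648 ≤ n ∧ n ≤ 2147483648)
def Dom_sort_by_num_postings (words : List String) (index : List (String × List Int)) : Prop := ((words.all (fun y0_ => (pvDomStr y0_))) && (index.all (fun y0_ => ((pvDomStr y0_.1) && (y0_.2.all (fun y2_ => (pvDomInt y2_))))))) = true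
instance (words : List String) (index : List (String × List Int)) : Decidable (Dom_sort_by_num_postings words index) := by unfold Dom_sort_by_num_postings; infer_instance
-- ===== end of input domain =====

-- B replaces A's comparison sort + membership filter by one grouping pass into
-- length-keyed buckets followed by emitting the buckets in ascending length order
-- (objective: alternative decomposition, same result).

-- ===== PORT A =====
-- A: sort the dict's keys by postings-list length (stable), then keep those in `words`.
def sort_by_num_postings (words : List String) (index : List (String × List Int)) : List String :=
  let d : PySem.Dict String (List Int) := PySem.Dict.ofList index
  let sorted_index_words :=
    PySem.List.sorted d.keys (fun k => ((d.getD k []).length : Int))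
  sorted_index_words.foldl (fun sorted_list w => if w ∈ words then sorted_list ++ [w] else sorted_list) []

-- ===== PORT B =====
-- B: bucket the kept words by postings length, then concatenate buckets by ascending length.
def sort_by_num_postings_alt (words : List String) (index : List (String × List Int)) : List String :=
  let d : PySem.Dict String (List Int) := PySem.Dict.ofList index
  let buckets : PySem.Dict Int (List String) :=
    d.items.foldl
      (fun b p => if p.1 ∈ words then b.modify ((p.2.length : Int)) [] (fun l => l ++ [p.1]) else b)
      PySem.Dict.empty
  (PySem.List.sorted buckets.keys (fun x => x)).foldl (fun out n => out ++ buckets.getD n []) []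

-- ===== PRECONDITION & SPEC =====
def Spec_sort_by_num_postings (words : List String) (index : List (String × List Int)) (out : List String) : Prop := out = sort_by_num_postings_alt words index
instance (words : List String) (index : List (String × List Int)) (out : List String) : Decidable (Spec_sort_by_num_postings words index out) := by unfold Spec_sort_by_num_postings; infer_instance

-- ===== CLAIM (what is proved, stated in full; the proofs are below) =====
def Claim_equal_sort_by_num_postings : Prop := ∀ (words : List String) (index : List (String × List Int)), Dom_sort_by_num_postings words index → Spec_sort_by_num_postings words index (sort_by_num_postings words index)

-- ===== LEMMAS AND PROOFS =====
theorem pv_insertBy_all_true {α : Type} (before : α → α → Bool) (x : α) (l : List α)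
    (h : ∀ y ∈ l, before x y = true) :
    PySem.List.insertBy before x l = x :: l := by
  cases l with
  | nil => rfl
  | cons a t => simp [PySem.List.insertBy, h a (by simp)]

theorem pv_filter_insertBy {α : Type} (f : α → Int) (q : α → Bool) (x : α) (l : List α)
    (hs : l.Pairwise (fun a b => f a ≤ f b)) :
    (PySem.List.insertBy (fun a b => decide (f a < f b)) x l).filter q =
      if q x then PySem.List.insertBy (fun a b => decide (f a < f b)) x (l.filter q)
      else l.filter q := by
  induction l with
  | nil => by_cases hqx : q x <;> simp [PySem.List.insertBy, hqx]
  | cons a t ih =>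
      rcases List.pairwise_cons.mp hs with ⟨ha, ht⟩
      by_cases hlt : f x < f a
      · -- x goes before a
        have hall : ∀ y ∈ (a :: t).filter q, decide (f x < f y) = true := by
          intro y hy
          rcases List.mem_cons.mp (List.mem_of_mem_filter hy) with rfl | hmem
          · simp [hlt]
          · simpa using lt_of_lt_of_le hlt (ha y hmem)
        rw [show PySem.List.insertBy (fun a b => decide (f a < f b)) x (a :: t) = x :: a :: t from by
              simp [PySem.List.insertBy, hlt],
            pv_insertBy_all_true _ x _ hall]
        by_cases hqx : q x <;> simp [hqx]
      · have := ih ht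
        by_cases hqa : q a <;> by_cases hqx : q x <;>
          simp [PySem.List.insertBy, hlt, hqa, hqx, this]

theorem pv_sorted_concat {α κ : Type} [LT κ] [DecidableLT κ] (xs : List α) (y : α) (key : α → κ) :
    PySem.List.sorted (xs ++ [y]) key =
      PySem.List.insertBy (fun a b => decide (key a < key b)) y (PySem.List.sorted xs key) := by
  rw [PySem.List.sorted_eq_foldl_insertBy, PySem.List.sorted_eq_foldl_insertBy, List.foldl_append]
  rfl

theorem pv_filter_sorted {α : Type} (f : α → Int) (q : α → Bool) (xs : List α) :
    (PySem.List.sorted xs f).filter q = PySem.List.sorted (xs.filter q) f := by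
  induction xs using List.reverseRecOn with
  | nil => rfl
  | append_singleton xs y ih =>
      rw [pv_sorted_concat, pv_filter_insertBy f q y _ (PySem.List.sorted_pairwise xs f),
        List.filter_append]
      by_cases hqy : q y <;> simp [hqy, ih, pv_sorted_concat]

theorem pv_insertBy_append_left {α : Type} (before : α → α → Bool) (x : α) (P Q : List α)
    (h : ∀ y ∈ P, before x y = false) :
    PySem.List.insertBy before x (P ++ Q) = P ++ PySem.List.insertBy before x Q := by
  induction P with
  | nil => rfl
  | cons a t ih =>
      simp only [List.cons_append, PySem.List.insertBy, h a (by simp)]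
      simp only [Bool.false_eq_true, if_false, List.cons.injEq, true_and]
      exact ih (fun y hy => h y (by simp [hy]))

theorem pv_flatMap_insert_mem {α : Type} (f : α → Int) (y : α) (Ls : List Int) (g : Int → List α)
    (hLs : Ls.Pairwise (· < ·)) (hmem : f y ∈ Ls) (hg : ∀ n, ∀ w ∈ g n, f w = n) :
    PySem.List.insertBy (fun a b => decide (f a < f b)) y (Ls.flatMap g) =
      Ls.flatMap (fun n => g n ++ if f y = n then [y] else []) := by
  induction Ls with
  | nil => cases hmem
  | cons n Ls ih =>
      rcases List.pairwise_cons.mp hLs with ⟨hn, hLs'⟩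
      simp only [List.flatMap_cons]
      by_cases hk : f y = n
      · subst hk
        have h1 : ∀ w ∈ g (f y), (fun a b => decide (f a < f b)) y w = false := fun w hw => by
          simp [hg _ w hw]
        rw [pv_insertBy_append_left _ _ _ _ h1]
        have h2 : ∀ w ∈ Ls.flatMap g, (fun a b => decide (f a < f b)) y w = true := by
          intro w hw
          rcases List.mem_flatMap.mp hw with ⟨m, hm, hwm⟩
          have : f w = m := hg m w hwm
          simp [this, hn m hm]
        rw [pv_insertBy_all_true _ _ _ h2]
        have h3 : Ls.flatMap (fun m => g m ++ if f y = m then [y] else []) = Ls.flatMap g := by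
          apply List.flatMap_congr
          intro m hm
          have : f y ≠ m := by have := hn m hm; omega
          simp [this]
        simp [h3]
      · have hmem' : f y ∈ Ls := by
          rcases List.mem_cons.mp hmem with h | h
          · exact absurd h hk
          · exact h
        have h1 : ∀ w ∈ g n, (fun a b => decide (f a < f b)) y w = false := fun w hw => by
          have := hg n w hw
          have := hn _ hmem'
          simp [‹f w = n›]; omega
        rw [pv_insertBy_append_left _ _ _ _ h1, ih hLs' hmem']
        simp [hk]

theorem pv_flatMap_insert_new {α : Type} (f : α → Int) (y : α) (Ls : List Int) (g : Int → List α)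
    (hLs : Ls.Pairwise (· < ·)) (hmem : f y ∉ Ls) (hg : ∀ n, ∀ w ∈ g n, f w = n)
    (hk : g (f y) = []) :
    PySem.List.insertBy (fun a b => decide (f a < f b)) y (Ls.flatMap g) =
      (PySem.List.insertBy (fun a b => decide (a < b)) (f y) Ls).flatMap
        (fun n => g n ++ if f y = n then [y] else []) := by
  induction Ls with
  | nil => simp [PySem.List.insertBy, hk]
  | cons n Ls ih =>
      rcases List.pairwise_cons.mp hLs with ⟨hn, hLs'⟩
      have hne : f y ≠ n := fun h => hmem (by simp [h])
      by_cases hlt : f y < n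
      · have h2 : ∀ w ∈ (n :: Ls).flatMap g, (fun a b => decide (f a < f b)) y w = true := by
          intro w hw
          rcases List.mem_flatMap.mp hw with ⟨m, hm, hwm⟩
          have hfw : f w = m := hg m w hwm
          rcases List.mem_cons.mp hm with rfl | hm'
          · simp [hfw, hlt]
          · have := hn m hm'
            simp [hfw]; omega
        rw [pv_insertBy_all_true _ _ _ h2]
        rw [show PySem.List.insertBy (fun a b => decide (a < b)) (f y) (n :: Ls) =
              f y :: n :: Ls from by simp [PySem.List.insertBy, hlt]]
        simp only [List.flatMap_cons, hk, List.nil_append]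
        have h3 : (n :: Ls).flatMap (fun m => g m ++ if f y = m then [y] else []) =
            (n :: Ls).flatMap g := by
          apply List.flatMap_congr
          intro m hm
          have : f y ≠ m := by
            rcases List.mem_cons.mp hm with rfl | hm'
            · exact hne
            · have := hn m hm'; omega
          simp [this]
        simp only [List.flatMap_cons] at h3
        rw [h3]
        rfl
      · have hgt : n < f y := by omega
        have h1 : ∀ w ∈ g n, (fun a b => decide (f a < f b)) y w = false := fun w hw => by
          have : f w = n := hg n w hw
          simp [this]; omega
        have hmem' : f y ∉ Ls := fun h => hmem (by simp [h])
        simp only [List.flatMap_cons]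
        rw [pv_insertBy_append_left _ _ _ _ h1, ih hLs' hmem']
        rw [show PySem.List.insertBy (fun a b => decide (a < b)) (f y) (n :: Ls) =
              n :: PySem.List.insertBy (fun a b => decide (a < b)) (f y) Ls from by
            simp [PySem.List.insertBy, hlt]]
        simp [hne]

theorem pv_main {α : Type} [BEq α] [LawfulBEq α] (f : α → Int) (ws : List α) :
    PySem.List.sorted ws f =
      (PySem.List.sorted (PySem.Set.ofList (ws.map f)) (fun x => x)).flatMap
        (fun n => ws.filter (fun w => f w == n)) := by
  induction ws using List.reverseRecOn with
  | nil => rfl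
  | append_singleton ws y ih =>
      rw [pv_sorted_concat, ih]
      have hLs : (PySem.List.sorted (PySem.Set.ofList (ws.map f)) (fun x => x)).Pairwise (· < ·) :=
        PySem.List.sorted_ofList_pairwise_lt _
      have hg : ∀ n, ∀ w ∈ ws.filter (fun w => f w == n), f w = n := by
        intro n w hw
        simpa using List.of_mem_filter hw
      have hset : PySem.Set.ofList ((ws ++ [y]).map f)
          = PySem.Set.add (PySem.Set.ofList (ws.map f)) (f y) := by
        rw [List.map_append, PySem.Set.ofList_eq_foldl, PySem.Set.ofList_eq_foldl,
          List.foldl_append]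
        rfl
      have hfilters : ∀ n, (ws ++ [y]).filter (fun w => f w == n)
          = ws.filter (fun w => f w == n) ++ (if f y = n then [y] else []) := by
        intro n
        rw [List.filter_append]
        congr 1
        by_cases h : f y = n <;> simp [h]
      by_cases hmem : f y ∈ PySem.Set.ofList (ws.map f)
      · have hadd : PySem.Set.add (PySem.Set.ofList (ws.map f)) (f y)
            = PySem.Set.ofList (ws.map f) := by
          simp [PySem.Set.add, PySem.Set.contains, hmem]
        rw [pv_flatMap_insert_mem f y _ _ hLs (by rw [PySem.List.mem_sorted]; exact hmem) hg,
          hset, hadd]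
        exact (List.flatMap_congr (fun n _ => (hfilters n))).symm
      · have hk : ws.filter (fun w => f w == f y) = [] := by
          rw [List.filter_eq_nil_iff]
          intro w hw
          simp only [beq_iff_eq]
          intro hfw
          exact hmem (by rw [PySem.Set.mem_ofList]; exact hfw ▸ List.mem_map_of_mem hw)
        have hadd : PySem.Set.add (PySem.Set.ofList (ws.map f)) (f y)
            = PySem.Set.ofList (ws.map f) ++ [f y] := by
          simp [PySem.Set.add, PySem.Set.contains, hmem]
        rw [pv_flatMap_insert_new f y _ _ hLs
            (by rw [PySem.List.mem_sorted]; exact hmem) hg hk, hset, hadd, pv_sorted_concat]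
        exact (List.flatMap_congr (fun n _ => (hfilters n))).symm

-- ===== VERDICT (by name: the statement is the Claim_ definition above) =====
theorem sort_by_num_postings_spec : Claim_equal_sort_by_num_postings := by
  intro words index _
  unfold Spec_sort_by_num_postings sort_by_num_postings sort_by_num_postings_alt
  simp only []
  set d := PySem.Dict.ofList index with hd
  set keyf : String → Int := fun k => ((d.getD k []).length : Int) with hkeyf
  rw [PySem.List.foldl_append_ite_eq_filter (fun w => w ∈ words)]
  rw [List.nil_append]
  rw [pv_filter_sorted keyf _ d.keys]
  rw [PySem.List.foldl_ite_eq_foldl_filter (fun p : String × List Int => p.1 ∈ words)]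
  set l := d.items.filter (fun p => decide (p.1 ∈ words)) with hl
  have hb : (l.foldl (fun b p => b.modify ((p.2.length : Int)) [] (fun v => v ++ [p.1])) PySem.Dict.empty)
      = ((l.map (fun p => ((p.2.length : Int), p.1))).foldl
          (fun b q => b.modify q.1 [] (fun v => v ++ [q.2])) PySem.Dict.empty) := by
    rw [List.foldl_map]
  rw [hb]
  set m := l.map (fun p => ((p.2.length : Int), p.1)) with hm
  rw [PySem.Dict.keys_foldl_modify_key m (fun q => q.1) ([] : List String)
       (fun _ q => fun v => v ++ [q.2]) PySem.Dict.empty]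
  have hkeys : PySem.Set.update (PySem.Dict.empty : PySem.Dict Int (List String)).keys (m.map (fun q => q.1))
      = PySem.Set.ofList (m.map (fun q => q.1)) := by
    rw [show (PySem.Dict.empty : PySem.Dict Int (List String)).keys = [] from rfl,
        PySem.Set.update_nil_left]
  rw [hkeys]
  rw [PySem.List.foldl_append_eq_flatMap, List.nil_append]
  have hnd : d.keys.Nodup := PySem.Dict.nodup_keys_ofList index
  have hkey : ∀ p ∈ l, keyf p.1 = (p.2.length : Int) := by
    intro p hp
    have hpi : (p.1, p.2) ∈ d.items := by
      simpa using List.mem_of_mem_filter hp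
    simp [hkeyf, PySem.Dict.getD_of_mem_items d hpi hnd []]
  have hws : List.filter (fun x => decide (x ∈ words)) d.keys = l.map (fun p => p.1) := by
    rw [show d.keys = d.items.map (fun p => p.1) from rfl, List.filter_map, hl]
    rfl
  rw [hws]
  have hgetd : ∀ n : Int,
      (m.foldl (fun b q => b.modify q.1 [] (fun v => v ++ [q.2])) PySem.Dict.empty).getD n []
        = (m.filter (fun q => q.1 == n)).map (fun q => q.2) := by
    intro n
    rw [PySem.Dict.getD_foldl_modify_append]
    rfl
  have hbucket : ∀ n : Int, (m.filter (fun q => q.1 == n)).map (fun q => q.2)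
      = (l.map (fun p => p.1)).filter (fun w => keyf w == n) := by
    intro n
    rw [hm, List.filter_map, List.map_map, List.filter_map]
    congr 1
    apply List.filter_congr
    intro p hp
    simp [Function.comp, hkey p hp]
  have hm1 : m.map (fun q => q.1) = (l.map (fun p => p.1)).map keyf := by
    rw [hm, List.map_map, List.map_map]
    apply List.map_congr_left
    intro p hp
    simp [Function.comp, hkey p hp]
  rw [pv_main keyf (l.map (fun p => p.1)), ← hm1]
  exact (List.flatMap_congr (fun n _ => (hgetd n).trans (hbucket n))).symm
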